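-- pv_equiv track=rewrite | github.com/v-monish-prasad/SpecialSubsequencesAG | SpecialSubsequencesAG.py | findSpecialSubsequencesAG
-- ===== SOURCE A (Python) =====
-- def findSpecialSubsequencesAG(array, length):
--     if not array:
--         return "Empty Array."
--
--     A_Count = 0
--     AG_Count = 0
--
--     for i in range(length):
--         if array[i] == 'A':
--             A_Count += 1
--         elif array[i] == 'G':
--             AG_Count += A_Count
--
--     return AG_Count
-- ===== SOURCE B (Python) =====
-- def findSpecialSubsequencesAG(array, length):
--     if not array:
--         return "Empty Array."
--
--     AG_Count = 0
--     for j in range(length):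
--         if array[j] == 'G':
--             for i in range(j):
--                 if array[i] == 'A':
--                     AG_Count += 1
--     return AG_Count
-- ===== Notes on version B (the rewrite author's own statement) =====
-- stated objective: alternative
-- what changed: Replaces the single pass with a running A-counter by the naive nested double loop: for each 'G' at index j, an inner scan counts the 'A's strictly before it.
-- outside the precondition, e.g. on findSpecialSubsequencesAG([], 0): A returns 'Empty Array.', B returns 'Empty Array.'
import Mathlib
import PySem

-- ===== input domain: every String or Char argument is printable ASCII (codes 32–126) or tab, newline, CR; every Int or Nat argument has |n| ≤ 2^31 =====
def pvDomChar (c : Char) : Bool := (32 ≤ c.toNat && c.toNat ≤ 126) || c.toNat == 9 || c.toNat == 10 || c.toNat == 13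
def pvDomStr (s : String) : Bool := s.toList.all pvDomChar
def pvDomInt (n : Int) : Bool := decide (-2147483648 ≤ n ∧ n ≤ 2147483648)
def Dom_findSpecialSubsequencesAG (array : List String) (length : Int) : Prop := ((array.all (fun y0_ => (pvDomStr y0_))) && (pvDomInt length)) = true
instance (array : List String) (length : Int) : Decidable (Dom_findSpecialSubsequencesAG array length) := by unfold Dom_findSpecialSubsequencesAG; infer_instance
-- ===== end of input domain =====

-- B replaces A's single pass with a running A-counter by the naive nested double
-- loop (for each 'G', an inner scan counts the 'A's strictly before it); not faster.

-- ===== PORT A =====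
-- one pass over range(length), state (A_Count, AG_Count); pyGetD is exact under Pre_ (indices in range there)
def findSpecialSubsequencesAG (array : List String) (length : Int) : Int :=
  if array = [] then 0   -- Python returns the string "Empty Array." here; excluded by Pre_
  else
    ((PySem.List.pyRange 0 length 1).foldl
      (fun (st : Int × Int) i =>
        if PySem.List.pyGetD array i "" = "A" then (st.1 + 1, st.2)
        else if PySem.List.pyGetD array i "" = "G" then (st.1, st.2 + st.1)
        else st) (0, 0)).2

-- ===== PORT B =====
def findSpecialSubsequencesAG_alt (array : List String) (length : Int) : Int :=
  if array = [] then 0   -- Python B also returns "Empty Array." here; excluded by Pre_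
  else
    (PySem.List.pyRange 0 length 1).foldl
      (fun acc j =>
        if PySem.List.pyGetD array j "" = "G" then
          acc + (PySem.List.pyRange 0 j 1).foldl
            (fun c i => if PySem.List.pyGetD array i "" = "A" then c + 1 else c) 0
        else acc) 0

-- ===== PRECONDITION & SPEC =====
-- Pre_ excludes the empty array (Python A returns the string "Empty Array.", not an int)
-- and length > len(array) (Python A raises IndexError inside the loop).
def Pre_findSpecialSubsequencesAG (array : List String) (length : Int) : Prop :=
  array ≠ [] ∧ length ≤ (array.length : Int)
instance (array : List String) (length : Int) : Decidable (Pre_findSpecialSubsequencesAG array length) := by unfold Pre_findSpecialSubsequencesAG; infer_instance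
def pvWitness_findSpecialSubsequencesAG : List String × Int := (["A", "C", "G"], 3)

def Spec_findSpecialSubsequencesAG (array : List String) (length : Int) (out : Int) : Prop := out = findSpecialSubsequencesAG_alt array length
instance (array : List String) (length : Int) (out : Int) : Decidable (Spec_findSpecialSubsequencesAG array length out) := by unfold Spec_findSpecialSubsequencesAG; infer_instance

-- ===== CLAIM (what is proved, stated in full; the proofs are below) =====
def Claim_equal_findSpecialSubsequencesAG : Prop := ∀ (array : List String) (length : Int), Dom_findSpecialSubsequencesAG array length → Pre_findSpecialSubsequencesAG array length → Spec_findSpecialSubsequencesAG array length (findSpecialSubsequencesAG array length)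

-- ===== LEMMAS AND PROOFS =====

-- inner count of B: number of 'A's among indices 0..n-1
def pvCA (array : List String) (n : Int) : Int :=
  (PySem.List.pyRange 0 n 1).foldl
    (fun c i => if PySem.List.pyGetD array i "" = "A" then c + 1 else c) 0

-- outer fold of B up to n
def pvBF (array : List String) (n : Int) : Int :=
  (PySem.List.pyRange 0 n 1).foldl
    (fun acc j =>
      if PySem.List.pyGetD array j "" = "G" then acc + pvCA array j else acc) 0

lemma pvCA_succ (array : List String) (k : Nat) :
    pvCA array ((k : Int) + 1)
      = pvCA array k + (if PySem.List.pyGetD array (k : Int) "" = "A" then 1 else 0) := by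
  unfold pvCA
  rw [PySem.List.pyRange_one_succ_right (by positivity : (0:Int) ≤ (k:Int)), List.foldl_append]
  simp only [List.foldl_cons, List.foldl_nil]
  split_ifs <;> omega

lemma pvBF_succ (array : List String) (k : Nat) :
    pvBF array ((k : Int) + 1)
      = pvBF array k + (if PySem.List.pyGetD array (k : Int) "" = "G" then pvCA array k else 0) := by
  unfold pvBF
  rw [PySem.List.pyRange_one_succ_right (by positivity : (0:Int) ≤ (k:Int)), List.foldl_append]
  simp only [List.foldl_cons, List.foldl_nil, pvCA]
  split_ifs <;> omega

lemma fold_invariant (array : List String) (n : Nat) :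
    (PySem.List.pyRange 0 (n : Int) 1).foldl
      (fun (st : Int × Int) i =>
        if PySem.List.pyGetD array i "" = "A" then (st.1 + 1, st.2)
        else if PySem.List.pyGetD array i "" = "G" then (st.1, st.2 + st.1)
        else st) (0, 0)
    = (pvCA array n, pvBF array n) := by
  induction n with
  | zero => simp [PySem.List.pyRange_one_eq_nil, pvCA, pvBF]
  | succ k ih =>
      have hk : (0 : Int) ≤ (k : Int) := by positivity
      push_cast
      rw [PySem.List.pyRange_one_succ_right hk, List.foldl_append, ih,
        pvCA_succ, pvBF_succ]
      simp only [List.foldl_cons, List.foldl_nil]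
      split_ifs with h1 h2
      · rw [h1] at h2; exact absurd h2 (by decide)
      · exact Prod.ext (by omega) (by omega)
      · exact Prod.ext (by omega) (by omega)
      · exact Prod.ext (by omega) (by omega)

lemma alt_eq_BF (array : List String) (length : Int) (h : array ≠ []) :
    findSpecialSubsequencesAG_alt array length = pvBF array length := by
  unfold findSpecialSubsequencesAG_alt pvBF pvCA
  simp [h]

-- ===== VERDICT (by name: the statement is the Claim_ definition above) =====
theorem findSpecialSubsequencesAG_spec : Claim_equal_findSpecialSubsequencesAG := by
  intro array length _ hpre
  unfold Spec_findSpecialSubsequencesAG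
  rw [alt_eq_BF array length hpre.1]
  unfold findSpecialSubsequencesAG
  rw [if_neg hpre.1]
  by_cases hl : length ≤ 0
  · rw [show PySem.List.pyRange 0 length 1 = [] from PySem.List.pyRange_one_eq_nil hl]
    unfold pvBF
    rw [show PySem.List.pyRange 0 length 1 = [] from PySem.List.pyRange_one_eq_nil hl]
    rfl
  · have : length = (length.toNat : Int) := by omega
    rw [this, fold_invariant]
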